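-- pv_equiv track=rewrite | github.com/GeekBerry/LICNsim | core/algorithm.py | graphHoops
-- ===== SOURCE A (Python) =====
-- def graphHoops(graph, center):
--     inter= set()
--     hoop= {center}
--     while hoop:
--         yield hoop# 返回当前圈
--         outer= set()
--         for node in hoop:# 找出hoop的所有相邻节点
--             outer |= graph[node].keys()
--         inter, hoop= hoop, outer- hoop- inter # 向外扩张一层
-- ===== SOURCE B (Python) =====
-- def graphHoops(graph, center):
--     # Recursive formulation: each call yields one ring, the next ring is a
--     # set comprehension over the frontier's neighbours minus one cumulative
--     # 'seen' set (instead of A's rotating two-layer (inter, hoop) subtraction).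
--     def rings(seen, frontier):
--         if not frontier:
--             return
--         yield frontier
--         nxt = {v for u in frontier for v in graph[u]} - seen
--         yield from rings(seen | nxt, nxt)
--     return rings({center}, {center})
-- ===== Notes on version B (the rewrite author's own statement) =====
-- stated objective: alternative
-- what changed: B is a recursive generator over (seen, frontier): each next ring is a flat set comprehension of the frontier's neighbours minus one cumulative seen set, replacing A's imperative while-loop with a per-node |= accumulation and the rotating two-layer (inter, hoop) subtraction.
import Mathlib
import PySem

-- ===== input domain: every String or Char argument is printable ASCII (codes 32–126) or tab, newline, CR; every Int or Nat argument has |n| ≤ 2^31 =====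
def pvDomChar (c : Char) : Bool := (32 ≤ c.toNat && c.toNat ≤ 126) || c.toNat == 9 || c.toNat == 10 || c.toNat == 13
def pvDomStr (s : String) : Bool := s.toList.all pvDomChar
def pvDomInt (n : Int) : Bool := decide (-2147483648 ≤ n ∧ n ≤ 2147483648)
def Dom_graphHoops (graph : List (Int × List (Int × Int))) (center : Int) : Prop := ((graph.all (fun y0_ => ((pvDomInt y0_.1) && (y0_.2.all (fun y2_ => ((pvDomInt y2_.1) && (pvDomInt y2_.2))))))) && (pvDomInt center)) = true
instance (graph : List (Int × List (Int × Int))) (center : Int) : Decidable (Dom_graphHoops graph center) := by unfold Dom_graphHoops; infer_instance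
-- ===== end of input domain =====

-- B replaces A's imperative loop with rotating two-layer (inter, hoop) bookkeeping by a
-- recursive generator over (seen, frontier) with one cumulative seen set; same rings, similar cost.


-- ===== PORT A =====
-- outer = set(); for node in hoop: outer |= graph[node].keys()   (none = KeyError)
def pvOuterA (graph : List (Int × List (Int × Int))) (hoop : List Int) : Option (PySem.Set Int) :=
  hoop.foldl
    (fun acc node =>
      acc.bind (fun outer =>
        (PySem.Dict.get? (PySem.Dict.mk graph) node).map
          (fun row => PySem.Set.union outer (row.map (·.1)))))
    (some PySem.Set.empty)

-- the while loop, fuel-bounded (graph.length + 2 steps suffice under Pre_); none = KeyError / fuel out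
def pvLoopA (graph : List (Int × List (Int × Int))) :
    Nat → List (List Int) → PySem.Set Int → PySem.Set Int → Option (List (List Int))
  | 0, _, _, _ => none
  | fuel+1, acc, inter, hoop =>
    if hoop.isEmpty then some acc
    else
      match pvOuterA graph hoop with
      | none => none
      | some outer =>
          pvLoopA graph fuel (acc ++ [hoop]) hoop (PySem.Set.diff (PySem.Set.diff outer hoop) inter)

def graphHoops (graph : List (Int × List (Int × Int))) (center : Int) : List (List Int) :=
  (pvLoopA graph (graph.length + 2) [] PySem.Set.empty [center]).getD []

-- ===== PORT B =====
-- graph[u].keys(); none = KeyError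
def pvKeysOf (graph : List (Int × List (Int × Int))) (u : Int) : Option (List Int) :=
  (PySem.Dict.get? (PySem.Dict.mk graph) u).map (List.map Prod.fst)

-- the comprehension {v for u in frontier for v in graph[u]}; none = KeyError
def pvComp (graph : List (Int × List (Int × Int))) (frontier : List Int) : Option (PySem.Set Int) :=
  (frontier.mapM (pvKeysOf graph)).map (fun rows => PySem.Set.ofList rows.flatten)

-- the recursive generator rings(seen, frontier) of Source B, fuel-bounded; none = KeyError / fuel out
def pvRings (graph : List (Int × List (Int × Int))) :
    Nat → PySem.Set Int → PySem.Set Int → Option (List (List Int))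
  | 0, _, _ => none
  | fuel+1, seen, frontier =>
    if frontier = [] then some []
    else
      (pvComp graph frontier).bind fun nbrs =>
        let nxt := PySem.Set.diff nbrs seen
        (pvRings graph fuel (PySem.Set.update seen nxt) nxt).map (frontier :: ·)

def graphHoops_alt (graph : List (Int × List (Int × Int))) (center : Int) : List (List Int) :=
  (pvRings graph (graph.length + 2) [center] [center]).getD []

-- ===== PRECONDITION & SPEC =====
-- graph[u] as a neighbour list (first-match lookup, [] when u is not a key)
def pvNbrs (graph : List (Int × List (Int × Int))) (u : Int) : List Int :=
  ((PySem.Dict.get? (PySem.Dict.mk graph) u).getD []).map (·.1)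

-- Pre_ excludes the inputs where A raises KeyError (center, or a node it reaches, not a
-- key) and graphs that are neither undirected (symmetric adjacency) nor of BFS radius
-- ≤ 2 from center: on other directed graphs A's two-layer subtraction can revisit nodes
-- and loop forever; this also excludes some deeper directed graphs on which A does
-- return (see cites) — the intended use is undirected graphs.
def Pre_graphHoops (graph : List (Int × List (Int × Int))) (center : Int) : Prop :=
  center ∈ graph.map Prod.fst ∧
  (((∀ v ∈ pvNbrs graph center, v ∈ graph.map Prod.fst) ∧
    (∀ v ∈ pvNbrs graph center, ∀ w ∈ pvNbrs graph v, w = center ∨ w ∈ pvNbrs graph center)) ∨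
   ∀ p ∈ graph, ∀ q ∈ p.2, p.1 ∈ pvNbrs graph q.1)
instance (graph : List (Int × List (Int × Int))) (center : Int) : Decidable (Pre_graphHoops graph center) := by
  unfold Pre_graphHoops; infer_instance

def pvWitness_graphHoops : (List (Int × List (Int × Int))) × Int :=
  ([(0, [(1, 5)]), (1, [(0, 7)]), (2, [])], 0)

def Spec_graphHoops (graph : List (Int × List (Int × Int))) (center : Int) (out : List (List Int)) : Prop := out = graphHoops_alt graph center
instance (graph : List (Int × List (Int × Int))) (center : Int) (out : List (List Int)) : Decidable (Spec_graphHoops graph center out) := by unfold Spec_graphHoops; infer_instance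

-- ===== CLAIM (what is proved, stated in full; the proofs are below) =====
def Claim_equal_graphHoops : Prop := ∀ (graph : List (Int × List (Int × Int))) (center : Int), Dom_graphHoops graph center → Pre_graphHoops graph center → Spec_graphHoops graph center (graphHoops graph center)

-- ===== LEMMAS AND PROOFS =====

-- Pre_ gives semantic symmetry of the adjacency relation.
theorem pvSym_of_pre (graph : List (Int × List (Int × Int)))
    (h : ∀ p ∈ graph, ∀ q ∈ p.2, p.1 ∈ pvNbrs graph q.1) :
    ∀ u v : Int, v ∈ pvNbrs graph u → u ∈ pvNbrs graph v := by
  intro u v hv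
  unfold pvNbrs at hv
  cases hget : PySem.Dict.get? (PySem.Dict.mk graph) u with
  | none => rw [hget] at hv; simp at hv
  | some row =>
    rw [hget] at hv
    simp only [Option.getD_some, List.mem_map] at hv
    obtain ⟨q, hq, hq1⟩ := hv
    simp only [PySem.Dict.get?, Option.map_eq_some_iff] at hget
    obtain ⟨p, hp, hp2⟩ := hget
    have hpu : p.1 = u := by simpa using List.find?_some hp
    have hpg : p ∈ graph := List.mem_of_find?_eq_some hp
    have := h p hpg q (by rw [hp2]; exact hq)
    rwa [hpu, hq1] at this

-- the concatenated neighbour streams of a frontier, used only by the proofs below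
def pvRows (graph : List (Int × List (Int × Int))) : List Int → Option (List Int)
  | [] => some []
  | node :: rest =>
    match PySem.Dict.get? (PySem.Dict.mk graph) node with
    | none => none
    | some row => (pvRows graph rest).map (fun ks => row.map (·.1) ++ ks)

theorem pvRows_eq_mapM (graph : List (Int × List (Int × Int))) :
    ∀ l : List Int, pvRows graph l = (l.mapM (pvKeysOf graph)).map List.flatten := by
  intro l
  induction l with
  | nil => rfl
  | cons n t ih =>
    simp only [pvRows, List.mapM_cons, pvKeysOf, ih]
    cases hget : PySem.Dict.get? (PySem.Dict.mk graph) n with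
    | none => rfl
    | some row =>
      cases ht : t.mapM (pvKeysOf graph) with
      | none => rfl
      | some rows => simp

theorem pvComp_eq_rows (graph : List (Int × List (Int × Int))) (l : List Int) :
    pvComp graph l = (pvRows graph l).map PySem.Set.ofList := by
  rw [pvComp, pvRows_eq_mapM]
  cases l.mapM (pvKeysOf graph) <;> rfl

-- the loop invariant relating B's seen set to A's (inter, hoop) pair
def pvInv (graph : List (Int × List (Int × Int))) (visited inter hoop : List Int) : Prop :=
  (∀ x ∈ inter, x ∈ visited) ∧ (∀ x ∈ hoop, x ∈ visited) ∧
  (∀ w ∈ visited, w ∉ hoop → ∀ u ∈ pvNbrs graph w, u ∈ visited) ∧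
  (∀ w ∈ visited, w ∉ hoop → w ∉ inter → ∀ u ∈ pvNbrs graph w, u ∉ hoop)

theorem pvRows_nbrs_sub (graph : List (Int × List (Int × Int))) :
    ∀ (hoop : List Int) (ks : List Int), pvRows graph hoop = some ks →
      ∀ u ∈ hoop, ∀ x ∈ pvNbrs graph u, x ∈ ks := by
  intro hoop
  induction hoop with
  | nil => intro ks _ u hu; simp at hu
  | cons n t ih =>
    intro ks hks u hu x hx
    simp only [pvRows] at hks
    cases hget : PySem.Dict.get? (PySem.Dict.mk graph) n with
    | none => rw [hget] at hks; simp at hks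
    | some row =>
      rw [hget] at hks
      simp only [Option.map_eq_some_iff] at hks
      obtain ⟨ks', hks', rfl⟩ := hks
      rcases List.mem_cons.1 hu with rfl | hu
      · unfold pvNbrs at hx; rw [hget] at hx
        exact List.mem_append_left _ (by simpa using hx)
      · exact List.mem_append_right _ (ih ks' hks' u hu x hx)

theorem pvRows_mem_ex (graph : List (Int × List (Int × Int))) :
    ∀ (hoop : List Int) (ks : List Int), pvRows graph hoop = some ks →
      ∀ x ∈ ks, ∃ u ∈ hoop, x ∈ pvNbrs graph u := by
  intro hoop
  induction hoop with
  | nil =>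
    intro ks hks x hx
    simp only [pvRows, Option.some.injEq] at hks
    subst hks; simp at hx
  | cons n t ih =>
    intro ks hks x hx
    simp only [pvRows] at hks
    cases hget : PySem.Dict.get? (PySem.Dict.mk graph) n with
    | none => rw [hget] at hks; simp at hks
    | some row =>
      rw [hget] at hks
      simp only [Option.map_eq_some_iff] at hks
      obtain ⟨ks', hks', rfl⟩ := hks
      rcases List.mem_append.1 hx with hx | hx
      · exact ⟨n, List.mem_cons_self .., by unfold pvNbrs; rw [hget]; simpa using hx⟩
      · obtain ⟨u, hu, hxu⟩ := ih ks' hks' x hx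
        exact ⟨u, List.mem_cons_of_mem _ hu, hxu⟩

theorem pvOuterA_eq_rows (graph : List (Int × List (Int × Int))) :
    ∀ (hoop : List Int) (s : PySem.Set Int),
      hoop.foldl
        (fun acc node =>
          acc.bind (fun outer =>
            (PySem.Dict.get? (PySem.Dict.mk graph) node).map
              (fun row => PySem.Set.union outer (row.map (·.1)))))
        (some s)
      = (pvRows graph hoop).map (fun ks => PySem.Set.update s ks) := by
  intro hoop
  induction hoop with
  | nil => intro s; simp [pvRows, PySem.Set.update]
  | cons n t ih =>
    intro s
    simp only [List.foldl_cons, Option.bind_some, pvRows]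
    cases hget : PySem.Dict.get? (PySem.Dict.mk graph) n with
    | none =>
      simp only [Option.map_none]
      have : ∀ (l : List Int),
          l.foldl
            (fun acc node =>
              acc.bind (fun outer =>
                (PySem.Dict.get? (PySem.Dict.mk graph) node).map
                  (fun row => PySem.Set.union outer (row.map (·.1)))))
            none = none := by
        intro l; induction l with
        | nil => rfl
        | cons a b ihb => simpa using ihb
      exact this t
    | some row =>
      simp only [Option.map_some]
      rw [ih (PySem.Set.union s (row.map (·.1)))]
      cases hrows : pvRows graph t with
      | none => rfl
      | some ks =>
        simp only [Option.map_some, Option.some.injEq]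
        show PySem.Set.update (PySem.Set.update s (row.map (·.1))) ks
          = PySem.Set.update s (row.map (·.1) ++ ks)
        simp [PySem.Set.update, List.foldl_append]

-- A's loop equals B's recursion (with A's accumulator appended in front), under the invariant
theorem pvLoop_eq (graph : List (Int × List (Int × Int)))
    (hsym : ∀ u v : Int, v ∈ pvNbrs graph u → u ∈ pvNbrs graph v) :
    ∀ (fuel : Nat) (acc : List (List Int)) (visited inter hoop : List Int),
      pvInv graph visited inter hoop →
      pvLoopA graph fuel acc inter hoop
        = (pvRings graph fuel visited hoop).map (fun rs => acc ++ rs) := by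
  intro fuel
  induction fuel with
  | zero => intro _ _ _ _ _; rfl
  | succ fuel ih =>
    intro acc visited inter hoop hinv
    obtain ⟨hIV, hHV, hB, hC⟩ := hinv
    simp only [pvLoopA, pvRings]
    by_cases hemp : hoop = []
    · subst hemp; simp
    · rw [if_neg (by simpa using hemp), if_neg hemp]
      have houter := pvOuterA_eq_rows graph hoop PySem.Set.empty
      unfold pvOuterA
      rw [houter, pvComp_eq_rows]
      cases hrows : pvRows graph hoop with
      | none => rfl
      | some ks =>
        simp only [Option.map_some, Option.bind_some]
        have hof : PySem.Set.update PySem.Set.empty ks = PySem.Set.ofList ks := rfl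
        rw [hof]
        set outer := PySem.Set.ofList ks with houterdef
        have houtmem : ∀ x, x ∈ outer ↔ x ∈ ks := fun x => PySem.Set.mem_ofList ks x
        -- the two next frontiers coincide
        have hfront : PySem.Set.diff (PySem.Set.diff outer hoop) inter
            = PySem.Set.diff outer visited := by
          show (outer.filter (fun x => !hoop.contains x)).filter (fun x => !inter.contains x)
            = outer.filter (fun x => !visited.contains x)
          rw [List.filter_filter]
          apply List.filter_congr
          intro x hxout
          have hiff : (x ∈ hoop ∨ x ∈ inter) ↔ x ∈ visited := by
            constructor
            · rintro (hx | hx); exacts [hHV x hx, hIV x hx]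
            · intro hxv
              by_contra hcon
              rw [not_or] at hcon
              obtain ⟨u, hu, hxu⟩ := pvRows_mem_ex graph hoop ks hrows x ((houtmem x).1 hxout)
              exact hC x hxv hcon.1 hcon.2 u (hsym u x hxu) hu
          have e1 : hoop.contains x = decide (x ∈ hoop) := by simp
          have e2 : inter.contains x = decide (x ∈ inter) := by simp
          have e3 : visited.contains x = decide (x ∈ visited) := by simp
          rw [e1, e2, e3]
          by_cases h1 : x ∈ hoop <;> by_cases h2 : x ∈ inter <;>
            by_cases h3 : x ∈ visited <;> simp_all
        rw [hfront]
        -- the invariant is preserved; then one recursion step on each side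
        rw [ih (acc ++ [hoop]) (PySem.Set.update visited (PySem.Set.diff outer visited))
          hoop (PySem.Set.diff outer visited) ?_]
        · cases pvRings graph fuel
            (PySem.Set.update visited (PySem.Set.diff outer visited))
            (PySem.Set.diff outer visited) with
          | none => rfl
          | some rs => simp
        refine ⟨fun x hx => PySem.Set.mem_update visited _ x |>.2 (Or.inl (hHV x hx)),
                fun x hx => PySem.Set.mem_update visited _ x |>.2 (Or.inr hx), ?_, ?_⟩
        · intro w hw hwf u hu
          have hwv : w ∈ visited := by
            rcases (PySem.Set.mem_update visited _ w).1 hw with h | h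
            · exact h
            · exact absurd h hwf
          rw [PySem.Set.mem_update]
          by_cases hwh : w ∈ hoop
          · have hks : u ∈ ks := pvRows_nbrs_sub graph hoop ks hrows w hwh u hu
            by_cases huv : u ∈ visited
            · exact Or.inl huv
            · refine Or.inr ((PySem.Set.mem_diff _ _ _).2 ⟨(houtmem u).2 hks, huv⟩)
          · exact Or.inl (hB w hwv hwh u hu)
        · intro w hw hwf hwh u hu
          have hwv : w ∈ visited := by
            rcases (PySem.Set.mem_update visited _ w).1 hw with h | h
            · exact h
            · exact absurd h hwf
          have huv : u ∈ visited := hB w hwv hwh u hu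
          intro hcon
          exact ((PySem.Set.mem_diff _ _ _).1 hcon).2 huv

theorem pvGet_isSome_of_mem_keys (graph : List (Int × List (Int × Int))) (v : Int)
    (hkey : v ∈ graph.map Prod.fst) :
    ∃ row, PySem.Dict.get? (PySem.Dict.mk graph) v = some row := by
  obtain ⟨p, hp, hp1⟩ := List.mem_map.1 hkey
  rcases hfs : List.find? (fun q => q.1 == v) graph with _ | q
  · exact absurd (by simpa using (List.find?_eq_none.1 hfs) p hp) (by simp [hp1])
  · exact ⟨q.2, by simp [PySem.Dict.get?, hfs]⟩

theorem pvRows_isSome (graph : List (Int × List (Int × Int))) :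
    ∀ (l : List Int), (∀ v ∈ l, ∃ row, PySem.Dict.get? (PySem.Dict.mk graph) v = some row) →
      ∃ ks, pvRows graph l = some ks := by
  intro l
  induction l with
  | nil => exact fun _ => ⟨[], rfl⟩
  | cons n t ih =>
    intro h
    obtain ⟨row, hrow⟩ := h n (List.mem_cons_self ..)
    obtain ⟨ks, hks⟩ := ih (fun v hv => h v (List.mem_cons_of_mem _ hv))
    exact ⟨row.map (·.1) ++ ks, by simp [pvRows, hrow, hks]⟩

-- the radius-2 case: everything the frontier reaches after one step is already
-- in {center} ∪ N(center), so both sides stop after at most two rings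
theorem pvRadius2 (graph : List (Int × List (Int × Int))) (center : Int)
    (row0 : List (Int × Int))
    (hget : PySem.Dict.get? (PySem.Dict.mk graph) center = some row0)
    (hkeys : ∀ v ∈ pvNbrs graph center, v ∈ graph.map Prod.fst)
    (hl2 : ∀ v ∈ pvNbrs graph center, ∀ w ∈ pvNbrs graph v,
             w = center ∨ w ∈ pvNbrs graph center) :
    ∀ (fuel : Nat) (acc : List (List Int)),
      pvLoopA graph (fuel + 3) acc PySem.Set.empty [center]
        = (pvRings graph (fuel + 3) [center] [center]).map (fun rs => acc ++ rs) := by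
  intro fuel acc
  have hN : pvNbrs graph center = row0.map (·.1) := by unfold pvNbrs; rw [hget]; rfl
  have houter0 : pvOuterA graph [center] = some (PySem.Set.ofList (row0.map (·.1))) := by
    simp [pvOuterA, hget]; rfl
  have hrows0 : pvRows graph [center] = some (row0.map (·.1)) := by
    simp [pvRows, hget]
  have hcomp0 : pvComp graph [center] = some (PySem.Set.ofList (row0.map (·.1))) := by
    rw [pvComp_eq_rows, hrows0]; rfl
  set h1 : PySem.Set Int := PySem.Set.diff (PySem.Set.ofList (row0.map (·.1))) [center]
    with hh1
  have hmemh1 : ∀ x, x ∈ h1 ↔ x ∈ row0.map (·.1) ∧ x ≠ center := by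
    intro x
    rw [hh1, PySem.Set.mem_diff, PySem.Set.mem_ofList]
    simp
  -- step 1 on each side
  show pvLoopA graph (fuel + 2 + 1) acc PySem.Set.empty [center]
    = (pvRings graph (fuel + 2 + 1) [center] [center]).map (fun rs => acc ++ rs)
  rw [pvLoopA, pvRings, if_neg (by simp), if_neg (by simp), houter0, hcomp0]
  simp only [Option.bind_some]
  have hdAe : PySem.Set.diff (PySem.Set.diff (PySem.Set.ofList (row0.map (·.1))) [center])
      PySem.Set.empty = h1 := by
    rw [hh1]; show List.filter _ _ = _; simp [PySem.Set.empty, PySem.Set.diff]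
  rw [hdAe, ← hh1]
  -- step 2: if the second ring is empty we are done, otherwise it dies at step 3
  rcases hh1e : h1 with _ | ⟨a, t⟩
  · show pvLoopA graph (fuel + 1 + 1) (acc ++ [[center]]) [center] []
      = Option.map (fun rs => acc ++ rs)
          (Option.map (fun x => [center] :: x) (pvRings graph (fuel + 1 + 1) _ []))
    rw [pvLoopA, pvRings]; simp
  · rw [← hh1e]
    obtain ⟨ks2, hks2⟩ := pvRows_isSome graph h1 (fun v hv => by
      refine pvGet_isSome_of_mem_keys graph v (hkeys v ?_)
      rw [hN]; exact ((hmemh1 v).1 hv).1)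
    have houter1 : pvOuterA graph h1 = some (PySem.Set.ofList ks2) := by
      unfold pvOuterA
      rw [pvOuterA_eq_rows graph h1 PySem.Set.empty, hks2]; rfl
    have hcomp1 : pvComp graph h1 = some (PySem.Set.ofList ks2) := by
      rw [pvComp_eq_rows, hks2]; rfl
    have hdead : ∀ x ∈ PySem.Set.ofList ks2, x = center ∨ (x ∈ row0.map (·.1) ∧ x ≠ center) := by
      intro x hx
      rw [PySem.Set.mem_ofList] at hx
      obtain ⟨v, hv, hxv⟩ := pvRows_mem_ex graph h1 ks2 hks2 x hx
      have hvN : v ∈ pvNbrs graph center := by rw [hN]; exact ((hmemh1 v).1 hv).1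
      rcases hl2 v hvN x hxv with h | h
      · exact Or.inl h
      · by_cases hc : x = center
        · exact Or.inl hc
        · exact Or.inr ⟨by rwa [hN] at h, hc⟩
    have hA2 : PySem.Set.diff (PySem.Set.diff (PySem.Set.ofList ks2) h1) [center] = [] := by
      apply List.filter_eq_nil_iff.2
      intro x hx
      obtain ⟨hxk, hxh⟩ := (PySem.Set.mem_diff _ _ _).1 hx
      rcases hdead x hxk with rfl | hxc
      · simp
      · exact absurd ((hmemh1 x).2 hxc) hxh
    have hB2 : PySem.Set.diff (PySem.Set.ofList ks2) (PySem.Set.update [center] h1) = [] := by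
      apply List.filter_eq_nil_iff.2
      intro x hx
      have hxin : x ∈ PySem.Set.update [center] h1 := by
        rw [PySem.Set.mem_update]
        rcases hdead x hx with rfl | hxc
        · exact Or.inl (by simp)
        · exact Or.inr ((hmemh1 x).2 hxc)
      simp [List.contains_eq_mem, hxin]
    show pvLoopA graph (fuel + 1 + 1) (acc ++ [[center]]) [center] h1
      = Option.map (fun rs => acc ++ rs)
          (Option.map (fun x => [center] :: x)
            (pvRings graph (fuel + 1 + 1) (PySem.Set.update [center] h1) h1))
    rw [pvLoopA, pvRings, if_neg (by simp [hh1e]), if_neg (by simp [hh1e]), houter1, hcomp1]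
    simp only [Option.bind_some]
    rw [hA2, hB2]
    show pvLoopA graph (fuel + 1) (acc ++ [[center]] ++ [h1]) h1 []
      = Option.map (fun rs => acc ++ rs)
          (Option.map (fun x => [center] :: x)
            (Option.map (fun x => h1 :: x)
              (pvRings graph (fuel + 1) _ [])))
    cases fuel with
    | zero => rw [pvLoopA, pvRings]; simp
    | succ f => rw [pvLoopA, pvRings]; simp

-- ===== VERDICT (by name: the statement is the Claim_ definition above) =====
theorem graphHoops_spec : Claim_equal_graphHoops := by
  intro graph center _hdom hpre
  show graphHoops graph center = graphHoops_alt graph center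
  unfold graphHoops graphHoops_alt
  rcases hpre with ⟨hkey, ⟨hkeys, hl2⟩ | hsym⟩
  · -- the radius-2 case
    obtain ⟨row0, hget⟩ := pvGet_isSome_of_mem_keys graph center hkey
    obtain ⟨p, rest, rfl⟩ : ∃ p rest, graph = p :: rest := by
      cases graph with
      | nil => simp at hkey
      | cons p rest => exact ⟨p, rest, rfl⟩
    show (pvLoopA (p :: rest) (rest.length + 3) [] PySem.Set.empty [center]).getD []
      = (pvRings (p :: rest) (rest.length + 3) [center] [center]).getD []
    rw [pvRadius2 (p :: rest) center row0 hget hkeys hl2 rest.length []]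
    cases pvRings (p :: rest) (rest.length + 3) [center] [center] <;> simp
  · rw [pvLoop_eq graph (pvSym_of_pre graph hsym) (graph.length + 2) [] [center]
      PySem.Set.empty [center] ?_]
    · cases pvRings graph (graph.length + 2) [center] [center] <;> simp
    refine ⟨fun x hx => by simp [PySem.Set.empty] at hx, fun x hx => hx, ?_, ?_⟩
    · intro w hw hwh
      exact absurd hw hwh
    · intro w hw hwh
      exact absurd hw hwh
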